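-- pv_equiv track=rewrite | github.com/AI-Alan/netsim | backend/layers/network/models.py | _matches
-- ===== SOURCE A (Python) =====
-- def _matches(ip: str, network: str, mask: str) -> bool:
--     try:
--         def to_int(a: str) -> int:
--             p = [int(x) for x in a.split(".")]
--             return (p[0]<<24)|(p[1]<<16)|(p[2]<<8)|p[3]
--         m = to_int(mask)
--         return (to_int(ip) & m) == (to_int(network) & m)
--     except Exception:
--         return False
-- ===== SOURCE B (Python) =====
-- def _matches(ip: str, network: str, mask: str) -> bool:
--     try:
--         ipo = [int(x) for x in ip.split(".")]
--         neto = [int(x) for x in network.split(".")]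
--         masko = [int(x) for x in mask.split(".")]
--         for i in range(4):
--             if (ipo[i] & masko[i]) != (neto[i] & masko[i]):
--                 return False
--         return True
--     except Exception:
--         return False
-- ===== Notes on version B (the rewrite author's own statement) =====
-- stated objective: alternative
-- what changed: B replaces A's pack-each-address-into-one-32-bit-integer-then-single-compare with a per-octet masked comparison loop over the four octet positions with early exit, never building a combined integer.
-- outside the precondition, e.g. on _matches('0.0.1.0', '0.0.0.256', '255.255.255.255'): A returns True, B returns False; on _matches('-1.2.3.4', '0.2.3.4', '255.255.255.0'): A returns False, B returns False
import Mathlib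
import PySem

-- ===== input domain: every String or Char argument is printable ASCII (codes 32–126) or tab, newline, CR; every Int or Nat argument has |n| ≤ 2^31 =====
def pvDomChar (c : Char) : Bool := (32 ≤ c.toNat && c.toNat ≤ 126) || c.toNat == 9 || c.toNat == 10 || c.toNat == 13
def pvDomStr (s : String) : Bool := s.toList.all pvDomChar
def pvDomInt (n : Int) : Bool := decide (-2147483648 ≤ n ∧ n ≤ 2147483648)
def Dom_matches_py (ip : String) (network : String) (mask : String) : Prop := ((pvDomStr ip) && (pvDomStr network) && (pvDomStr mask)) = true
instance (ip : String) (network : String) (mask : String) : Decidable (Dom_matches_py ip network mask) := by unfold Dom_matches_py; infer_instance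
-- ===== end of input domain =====

-- B replaces A's pack-into-one-32-bit-integer-then-compare with a per-octet masked
-- comparison loop with early exit (objective: alternative decomposition, same cost).

-- shared by both ports: `[int(x) for x in a.split(".")]` (none = some int() raised ValueError)
def pvParseAll : List (List Char) → Option (List Int)
  | [] => some []
  | x :: xs =>
    match PySem.Int.ofChars? x, pvParseAll xs with
    | some v, some vs => some (v :: vs)
    | _, _ => none

def pvOcts (s : String) : Option (List Int) :=
  pvParseAll (PySem.Chars.splitOn s.toList ['.'])

-- ===== PORT A =====
-- A's local helper to_int: none = an exception (ValueError from int(), IndexError from p[k])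
def pvToInt (a : String) : Option Int :=
  match pvOcts a with
  | none => none
  | some p =>
    match PySem.List.pyGet? p 0, PySem.List.pyGet? p 1, PySem.List.pyGet? p 2,
        PySem.List.pyGet? p 3 with
    | some p0, some p1, some p2, some p3 =>
        some (PySem.Int.bor (PySem.Int.bor (PySem.Int.bor (p0 <<< (24:Nat)) (p1 <<< (16:Nat)))
          (p2 <<< (8:Nat))) p3)
    | _, _, _, _ => none

def matches_py (ip : String) (network : String) (mask : String) : Bool :=
  match pvToInt mask with
  | none => false
  | some m =>
    match pvToInt ip with
    | none => false
    | some i =>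
      match pvToInt network with
      | none => false
      | some n => decide (PySem.Int.band i m = PySem.Int.band n m)

-- ===== PORT B =====
-- `for i in range(4)` body; any failing index access = IndexError, caught → False
def pvLoop (ipo neto masko : List Int) : List Int → Bool
  | [] => true
  | i :: rest =>
    match PySem.List.pyGet? ipo i, PySem.List.pyGet? neto i, PySem.List.pyGet? masko i with
    | some a, some n, some m =>
      if PySem.Int.band a m ≠ PySem.Int.band n m then false else pvLoop ipo neto masko rest
    | _, _, _ => false

def matches_py_alt (ip : String) (network : String) (mask : String) : Bool :=
  match pvOcts ip with
  | none => false
  | some ipo =>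
    match pvOcts network with
    | none => false
    | some neto =>
      match pvOcts mask with
      | none => false
      | some masko => pvLoop ipo neto masko (PySem.List.pyRange 0 4 1)

-- ===== PRECONDITION & SPEC =====
def pvParts (s : String) : List (List Char) := PySem.Chars.splitOn s.toList ['.']

-- "this dot-separated field is an integer in 0..255"
def pvOctOK (x : List Char) : Bool :=
  match PySem.Int.ofChars? x with
  | some v => decide (0 ≤ v) && decide (v ≤ 255)
  | none => false

-- "s has ≥ 4 dot-separated fields, all of them integers"
def pvOk4 (s : String) : Bool :=
  decide (4 ≤ (pvParts s).length) && (pvParts s).all (fun x => (PySem.Int.ofChars? x).isSome)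

-- "… and the first four are in 0..255"
def pvRange4 (s : String) : Bool :=
  pvOk4 s && ((pvParts s).take 4).all pvOctOK

-- Pre_ excludes only inputs on which all three strings parse as lists of ≥ 4 integer octets but
-- some of the first four octets lies outside 0..255: there the dotted quad is malformed and A's
-- packed 32-bit comparison lets one octet's bits carry into its neighbour, while B compares octet
-- by octet — both readings of a malformed quad are defensible and neither is specified.
def Pre_matches_py (ip : String) (network : String) (mask : String) : Prop :=
  (!(pvOk4 ip && pvOk4 network && pvOk4 mask)
    || (pvRange4 ip && pvRange4 network && pvRange4 mask)) = true

instance (ip : String) (network : String) (mask : String) : Decidable (Pre_matches_py ip network mask) := by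
  unfold Pre_matches_py; infer_instance

def pvWitness_matches_py : String × String × String := ("1.2.3.4", "1.2.3.0", "255.255.255.0")

def Spec_matches_py (ip : String) (network : String) (mask : String) (out : Bool) : Prop :=
  out = matches_py_alt ip network mask
instance (ip : String) (network : String) (mask : String) (out : Bool) : Decidable (Spec_matches_py ip network mask out) := by unfold Spec_matches_py; infer_instance

-- ===== CLAIM (what is proved, stated in full; the proofs are below) =====
def Claim_equal_matches_py : Prop := ∀ (ip : String) (network : String) (mask : String), Dom_matches_py ip network mask → Pre_matches_py ip network mask → Spec_matches_py ip network mask (matches_py ip network mask)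

-- ===== LEMMAS AND PROOFS =====

def packN (a b c d : Nat) : Nat := (a <<< 24) ||| (b <<< 16) ||| (c <<< 8) ||| d

theorem packN_testBit (a b c d : Nat) (i : Nat) :
    (packN a b c d).testBit i =
      ((decide (24 ≤ i) && a.testBit (i-24)) || (decide (16 ≤ i) && b.testBit (i-16)) ||
       (decide (8 ≤ i) && c.testBit (i-8)) || d.testBit i) := by
  simp [packN, Nat.testBit_shiftLeft]

theorem tb_false {x : Nat} (hx : x < 256) {i : Nat} (hi : 8 ≤ i) : x.testBit i = false := by
  apply Nat.testBit_lt_two_pow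
  calc x < 256 := hx
    _ = 2 ^ 8 := by norm_num
    _ ≤ 2 ^ i := Nat.pow_le_pow_right (by norm_num) hi

theorem land_lt {x y : Nat} (hx : x < 256) : x &&& y < 256 :=
  Nat.lt_of_le_of_lt Nat.and_le_left hx

theorem packN_land (a b c d p q r s : Nat) (hb : b < 256) (hc : c < 256)
    (hd : d < 256) (hq : q < 256) (hr : r < 256) (hs : s < 256) :
    packN a b c d &&& packN p q r s = packN (a &&& p) (b &&& q) (c &&& r) (d &&& s) := by
  apply Nat.eq_of_testBit_eq
  intro i
  rw [Nat.testBit_and, packN_testBit, packN_testBit, packN_testBit]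
  by_cases h1 : i < 8
  · simp [Nat.not_le.2 (show i < 24 by omega), Nat.not_le.2 (show i < 16 by omega),
      Nat.not_le.2 h1, Nat.testBit_and]
  · by_cases h2 : i < 16
    · simp [Nat.not_le.2 (show i < 24 by omega), Nat.not_le.2 (show i < 16 from h2),
        Nat.le_of_not_lt h1, tb_false hd (show 8 ≤ i by omega), tb_false hs (show 8 ≤ i by omega),
        tb_false (land_lt hd) (show 8 ≤ i by omega), Nat.testBit_and]
    · by_cases h3 : i < 24
      · simp [Nat.not_le.2 (show i < 24 from h3), Nat.le_of_not_lt h2, Nat.le_of_not_lt h1,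
          tb_false hd (show 8 ≤ i by omega), tb_false hs (show 8 ≤ i by omega),
          tb_false hc (show 8 ≤ i - 8 by omega), tb_false hr (show 8 ≤ i - 8 by omega),
          tb_false (land_lt hd) (show 8 ≤ i by omega),
          tb_false (land_lt hc) (show 8 ≤ i - 8 by omega),
          Nat.testBit_and]
      · simp [Nat.le_of_not_lt h3, Nat.le_of_not_lt h2, Nat.le_of_not_lt h1,
          tb_false hd (show 8 ≤ i by omega), tb_false hs (show 8 ≤ i by omega),
          tb_false hc (show 8 ≤ i - 8 by omega), tb_false hr (show 8 ≤ i - 8 by omega),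
          tb_false hb (show 8 ≤ i - 16 by omega), tb_false hq (show 8 ≤ i - 16 by omega),
          tb_false (land_lt hd) (show 8 ≤ i by omega),
          tb_false (land_lt hc) (show 8 ≤ i - 8 by omega),
          tb_false (land_lt hb) (show 8 ≤ i - 16 by omega),
          Nat.testBit_and]

theorem packN_inj (a b c d e f g h : Nat) (ha : a < 256) (hb : b < 256) (hc : c < 256)
    (hd : d < 256) (he : e < 256) (hf : f < 256) (hg : g < 256) (hh : h < 256) :
    (packN a b c d = packN e f g h) ↔ (a = e ∧ b = f ∧ c = g ∧ d = h) := by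
  constructor
  · intro heq
    have tb : ∀ i, (packN a b c d).testBit i = (packN e f g h).testBit i := fun i => by rw [heq]
    refine ⟨Nat.eq_of_testBit_eq fun j => ?_, Nat.eq_of_testBit_eq fun j => ?_,
      Nat.eq_of_testBit_eq fun j => ?_, Nat.eq_of_testBit_eq fun j => ?_⟩
    · by_cases hj : j < 8
      · have := tb (j + 24)
        simpa [packN_testBit, tb_false hb (show 8 ≤ j + 8 by omega),
          tb_false hf (show 8 ≤ j + 8 by omega),
          tb_false hc (show 8 ≤ j + 16 by omega), tb_false hg (show 8 ≤ j + 16 by omega),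
          tb_false hd (show 8 ≤ j + 24 by omega), tb_false hh (show 8 ≤ j + 24 by omega),
          show j + 24 - 24 = j by omega, show j + 24 - 16 = j + 8 by omega,
          show j + 24 - 8 = j + 16 by omega] using this
      · rw [tb_false ha (Nat.le_of_not_lt hj), tb_false he (Nat.le_of_not_lt hj)]
    · by_cases hj : j < 8
      · have := tb (j + 16)
        simpa [packN_testBit, Nat.not_le.2 (show j + 16 < 24 by omega),
          tb_false hc (show 8 ≤ j + 8 by omega), tb_false hg (show 8 ≤ j + 8 by omega),
          tb_false hd (show 8 ≤ j + 16 by omega), tb_false hh (show 8 ≤ j + 16 by omega),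
          show j + 16 - 16 = j by omega, show j + 16 - 8 = j + 8 by omega] using this
      · rw [tb_false hb (Nat.le_of_not_lt hj), tb_false hf (Nat.le_of_not_lt hj)]
    · by_cases hj : j < 8
      · have := tb (j + 8)
        simpa [packN_testBit, Nat.not_le.2 (show j + 8 < 24 by omega),
          Nat.not_le.2 (show j + 8 < 16 by omega),
          tb_false hd (show 8 ≤ j + 8 by omega), tb_false hh (show 8 ≤ j + 8 by omega),
          show j + 8 - 8 = j by omega] using this
      · rw [tb_false hc (Nat.le_of_not_lt hj), tb_false hg (Nat.le_of_not_lt hj)]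
    · by_cases hj : j < 8
      · have := tb j
        simpa [packN_testBit, Nat.not_le.2 (show j < 24 by omega),
          Nat.not_le.2 (show j < 16 by omega), Nat.not_le.2 (show j < 8 from hj)] using this
      · rw [tb_false hd (Nat.le_of_not_lt hj), tb_false hh (Nat.le_of_not_lt hj)]
  · rintro ⟨rfl, rfl, rfl, rfl⟩; rfl

theorem pyGet?_cons4 (a b c d : Int) (t : List Int) :
    (PySem.List.pyGet? (a::b::c::d::t) 0 = some a) ∧
    (PySem.List.pyGet? (a::b::c::d::t) 1 = some b) ∧
    (PySem.List.pyGet? (a::b::c::d::t) 2 = some c) ∧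
    (PySem.List.pyGet? (a::b::c::d::t) 3 = some d) := by
  refine ⟨?_, ?_, ?_, ?_⟩ <;>
    · simp only [PySem.List.pyGet?, PySem.List.pyIdx?]
      norm_num
      first
      | rfl
      | (rw [if_pos (by omega)]; rfl)

theorem pyGet?_short (p : List Int) (h : p.length < 4) : PySem.List.pyGet? p 3 = none := by
  simp only [show (3:Int) = ((3:Nat):Int) by norm_num, PySem.List.pyGet?_natCast]
  simp
  omega

-- the packed integer A builds, as a proof-side abbreviation
def packI (a b c d : Int) : Int :=
  PySem.Int.bor (PySem.Int.bor (PySem.Int.bor (a <<< (24:Nat)) (b <<< (16:Nat))) (c <<< (8:Nat))) d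

theorem pvToInt_none (s : String) (h : pvOcts s = none) : pvToInt s = none := by
  simp [pvToInt, h]

theorem pvToInt_short (s : String) (p : List Int) (h : pvOcts s = some p)
    (hl : p.length < 4) : pvToInt s = none := by
  simp [pvToInt, h, pyGet?_short p hl]

theorem pvToInt_long (s : String) (a b c d : Int) (t : List Int)
    (h : pvOcts s = some (a::b::c::d::t)) : pvToInt s = some (packI a b c d) := by
  obtain ⟨h0, h1, h2, h3⟩ := pyGet?_cons4 a b c d t
  simp [pvToInt, h, h0, h1, h2, h3, packI]

theorem parseAll_eq (l : List (List Char)) :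
    pvParseAll l = if (l.all fun x => (PySem.Int.ofChars? x).isSome) = true
      then some (l.map fun x => (PySem.Int.ofChars? x).getD 0) else none := by
  induction l with
  | nil => simp [pvParseAll]
  | cons x xs ih =>
    cases hf : PySem.Int.ofChars? x
    · simp [pvParseAll, hf]
    · rw [pvParseAll, hf, ih]
      by_cases hall : (xs.all fun x => (PySem.Int.ofChars? x).isSome) = true <;>
        simp [hall, hf]

theorem ok4_false_len (s : String) (p : List Int) (ho : pvOk4 s = false)
    (h : pvOcts s = some p) : p.length < 4 := by
  rw [pvOcts, ← pvParts, parseAll_eq] at h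
  unfold pvOk4 at ho
  split at h
  · rename_i hall
    rw [hall] at ho
    simp only [Bool.and_true, decide_eq_false_iff_not, not_le] at ho
    have hp : p = (pvParts s).map fun x => (PySem.Int.ofChars? x).getD 0 := by
      simpa using h.symm
    rw [hp, List.length_map]
    omega
  · exact absurd h (by simp)

theorem pvToInt_of_ok4_false (s : String) (ho : pvOk4 s = false) : pvToInt s = none := by
  cases hp : pvOcts s with
  | none => exact pvToInt_none s hp
  | some p => exact pvToInt_short s p hp (ok4_false_len s p ho hp)

theorem matches_py_false (ip network mask : String)
    (h : pvToInt ip = none ∨ pvToInt network = none ∨ pvToInt mask = none) :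
    matches_py ip network mask = false := by
  rcases h with h | h | h
  · cases hm : pvToInt mask <;> simp [matches_py, hm, h]
  · cases hm : pvToInt mask <;> cases hi : pvToInt ip <;> simp [matches_py, hm, hi, h]
  · simp [matches_py, h]

theorem pvLoop_isSome (ipo neto masko : List Int) (l : List Int)
    (h : pvLoop ipo neto masko l = true) :
    ∀ i ∈ l, (PySem.List.pyGet? ipo i).isSome ∧ (PySem.List.pyGet? neto i).isSome ∧
      (PySem.List.pyGet? masko i).isSome := by
  induction l with
  | nil => simp
  | cons i rest ih =>
    intro j hj
    rw [pvLoop] at h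
    rcases hi : PySem.List.pyGet? ipo i with _ | a <;> rw [hi] at h
    · simp at h
    rcases hn : PySem.List.pyGet? neto i with _ | n <;> rw [hn] at h
    · simp at h
    rcases hm : PySem.List.pyGet? masko i with _ | m <;> rw [hm] at h
    · simp at h
    simp only at h
    split at h
    · simp at h
    · rcases List.mem_cons.1 hj with rfl | hj
      · exact ⟨by simp [hi], by simp [hn], by simp [hm]⟩
      · exact ih h j hj

theorem pyRange04 : PySem.List.pyRange 0 4 1 = [0, 1, 2, 3] := by decide

theorem pyGet?_isSome_len (xs : List Int) (h : (PySem.List.pyGet? xs 3).isSome) :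
    4 ≤ xs.length := by
  by_contra hlen
  rw [pyGet?_short xs (by omega)] at h
  simp at h

theorem pvLoop_short (ipo neto masko : List Int)
    (h : ipo.length < 4 ∨ neto.length < 4 ∨ masko.length < 4) :
    pvLoop ipo neto masko (PySem.List.pyRange 0 4 1) = false := by
  by_contra hb
  have ht : pvLoop ipo neto masko (PySem.List.pyRange 0 4 1) = true := by
    revert hb; cases pvLoop ipo neto masko (PySem.List.pyRange 0 4 1) <;> simp
  have := pvLoop_isSome _ _ _ _ ht 3 (by rw [pyRange04]; simp)
  rcases h with h | h | h
  · exact absurd (pyGet?_isSome_len _ this.1) (by omega)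
  · exact absurd (pyGet?_isSome_len _ this.2.1) (by omega)
  · exact absurd (pyGet?_isSome_len _ this.2.2) (by omega)

theorem alt_false (ip network mask : String)
    (h : pvOk4 ip = false ∨ pvOk4 network = false ∨ pvOk4 mask = false) :
    matches_py_alt ip network mask = false := by
  cases hi : pvOcts ip with
  | none => simp [matches_py_alt, hi]
  | some ipo =>
    cases hn : pvOcts network with
    | none => simp [matches_py_alt, hi, hn]
    | some neto =>
      cases hm : pvOcts mask with
      | none => simp [matches_py_alt, hi, hn, hm]
      | some masko =>
        simp only [matches_py_alt, hi, hn, hm]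
        apply pvLoop_short
        rcases h with h | h | h
        · exact Or.inl (ok4_false_len ip ipo h hi)
        · exact Or.inr (Or.inl (ok4_false_len network neto h hn))
        · exact Or.inr (Or.inr (ok4_false_len mask masko h hm))

theorem if_ne_and (x y : Int) (r : Bool) :
    (if x ≠ y then false else r) = (decide (x = y) && r) := by
  by_cases h : x = y <;> simp [h]

theorem pvLoop_four (a0 a1 a2 a3 n0 n1 n2 n3 m0 m1 m2 m3 : Int) (ta tn tm : List Int) :
    pvLoop (a0::a1::a2::a3::ta) (n0::n1::n2::n3::tn) (m0::m1::m2::m3::tm)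
        (PySem.List.pyRange 0 4 1) =
      (decide (PySem.Int.band a0 m0 = PySem.Int.band n0 m0) &&
       decide (PySem.Int.band a1 m1 = PySem.Int.band n1 m1) &&
       decide (PySem.Int.band a2 m2 = PySem.Int.band n2 m2) &&
       decide (PySem.Int.band a3 m3 = PySem.Int.band n3 m3)) := by
  obtain ⟨ha0, ha1, ha2, ha3⟩ := pyGet?_cons4 a0 a1 a2 a3 ta
  obtain ⟨hn0, hn1, hn2, hn3⟩ := pyGet?_cons4 n0 n1 n2 n3 tn
  obtain ⟨hm0, hm1, hm2, hm3⟩ := pyGet?_cons4 m0 m1 m2 m3 tm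
  rw [pyRange04]
  simp only [pvLoop, ha0, ha1, ha2, ha3, hn0, hn1, hn2, hn3, hm0, hm1, hm2, hm3, if_ne_and]
  cases decide (PySem.Int.band a0 m0 = PySem.Int.band n0 m0) <;>
  cases decide (PySem.Int.band a1 m1 = PySem.Int.band n1 m1) <;>
  cases decide (PySem.Int.band a2 m2 = PySem.Int.band n2 m2) <;>
  cases decide (PySem.Int.band a3 m3 = PySem.Int.band n3 m3) <;> simp

theorem packI_natCast (w x y z : Nat) :
    packI ↑w ↑x ↑y ↑z = ((packN w x y z : Nat) : Int) := by
  rw [packI, ← Int.natCast_shiftLeft, ← Int.natCast_shiftLeft, ← Int.natCast_shiftLeft,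
    PySem.Int.bor_natCast, PySem.Int.bor_natCast, PySem.Int.bor_natCast, packN]

theorem bandPack_iff (a0 a1 a2 a3 n0 n1 n2 n3 m0 m1 m2 m3 : Int)
    (ha0 : 0 ≤ a0 ∧ a0 ≤ 255) (ha1 : 0 ≤ a1 ∧ a1 ≤ 255) (ha2 : 0 ≤ a2 ∧ a2 ≤ 255)
    (ha3 : 0 ≤ a3 ∧ a3 ≤ 255) (hn0 : 0 ≤ n0 ∧ n0 ≤ 255) (hn1 : 0 ≤ n1 ∧ n1 ≤ 255)
    (hn2 : 0 ≤ n2 ∧ n2 ≤ 255) (hn3 : 0 ≤ n3 ∧ n3 ≤ 255) (hm0 : 0 ≤ m0 ∧ m0 ≤ 255)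
    (hm1 : 0 ≤ m1 ∧ m1 ≤ 255) (hm2 : 0 ≤ m2 ∧ m2 ≤ 255) (hm3 : 0 ≤ m3 ∧ m3 ≤ 255) :
    (PySem.Int.band (packI a0 a1 a2 a3) (packI m0 m1 m2 m3) =
      PySem.Int.band (packI n0 n1 n2 n3) (packI m0 m1 m2 m3)) ↔
    (PySem.Int.band a0 m0 = PySem.Int.band n0 m0 ∧
     PySem.Int.band a1 m1 = PySem.Int.band n1 m1 ∧
     PySem.Int.band a2 m2 = PySem.Int.band n2 m2 ∧
     PySem.Int.band a3 m3 = PySem.Int.band n3 m3) := by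
  rw [show a0 = ((a0.toNat : Nat) : Int) from (Int.toNat_of_nonneg ha0.1).symm,
      show a1 = ((a1.toNat : Nat) : Int) from (Int.toNat_of_nonneg ha1.1).symm,
      show a2 = ((a2.toNat : Nat) : Int) from (Int.toNat_of_nonneg ha2.1).symm,
      show a3 = ((a3.toNat : Nat) : Int) from (Int.toNat_of_nonneg ha3.1).symm,
      show n0 = ((n0.toNat : Nat) : Int) from (Int.toNat_of_nonneg hn0.1).symm,
      show n1 = ((n1.toNat : Nat) : Int) from (Int.toNat_of_nonneg hn1.1).symm,
      show n2 = ((n2.toNat : Nat) : Int) from (Int.toNat_of_nonneg hn2.1).symm,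
      show n3 = ((n3.toNat : Nat) : Int) from (Int.toNat_of_nonneg hn3.1).symm,
      show m0 = ((m0.toNat : Nat) : Int) from (Int.toNat_of_nonneg hm0.1).symm,
      show m1 = ((m1.toNat : Nat) : Int) from (Int.toNat_of_nonneg hm1.1).symm,
      show m2 = ((m2.toNat : Nat) : Int) from (Int.toNat_of_nonneg hm2.1).symm,
      show m3 = ((m3.toNat : Nat) : Int) from (Int.toNat_of_nonneg hm3.1).symm]
  rw [packI_natCast, packI_natCast, packI_natCast]
  rw [PySem.Int.band_natCast, PySem.Int.band_natCast]
  rw [Int.natCast_inj]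
  rw [packN_land _ _ _ _ _ _ _ _ (by omega) (by omega) (by omega) (by omega) (by omega) (by omega),
      packN_land _ _ _ _ _ _ _ _ (by omega) (by omega) (by omega) (by omega) (by omega) (by omega)]
  rw [packN_inj _ _ _ _ _ _ _ _ (land_lt (by omega)) (land_lt (by omega)) (land_lt (by omega))
      (land_lt (by omega)) (land_lt (by omega)) (land_lt (by omega)) (land_lt (by omega))
      (land_lt (by omega))]
  simp only [PySem.Int.band_natCast, Int.natCast_inj]

theorem octOK_bounds (x : List Char) (h : pvOctOK x = true) :
    0 ≤ (PySem.Int.ofChars? x).getD 0 ∧ (PySem.Int.ofChars? x).getD 0 ≤ 255 := by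
  unfold pvOctOK at h
  cases hf : PySem.Int.ofChars? x <;> rw [hf] at h <;> simp_all

theorem range4_shape (s : String) (h : pvRange4 s = true) :
    ∃ a b c d t, pvOcts s = some (a::b::c::d::t) ∧
      (0 ≤ a ∧ a ≤ 255) ∧ (0 ≤ b ∧ b ≤ 255) ∧ (0 ≤ c ∧ c ≤ 255) ∧ (0 ≤ d ∧ d ≤ 255) := by
  unfold pvRange4 pvOk4 at h
  simp only [Bool.and_eq_true, decide_eq_true_eq, List.all_eq_true] at h
  obtain ⟨⟨hlen, hall⟩, hok⟩ := h
  rcases hx : pvParts s with _ | ⟨x0, _ | ⟨x1, _ | ⟨x2, _ | ⟨x3, tx⟩⟩⟩⟩ <;>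
    rw [hx] at hlen <;> simp at hlen
  rw [hx] at hok
  have hocts : pvOcts s =
      some (((x0::x1::x2::x3::tx).map fun x => (PySem.Int.ofChars? x).getD 0)) := by
    rw [pvOcts, ← pvParts, hx, parseAll_eq, if_pos]
    rw [← hx]
    exact List.all_eq_true.2 hall
  refine ⟨_, _, _, _, _, by simpa using hocts, ?_, ?_, ?_, ?_⟩
  · exact octOK_bounds x0 (hok x0 (by simp))
  · exact octOK_bounds x1 (hok x1 (by simp))
  · exact octOK_bounds x2 (hok x2 (by simp))
  · exact octOK_bounds x3 (hok x3 (by simp))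

-- ===== VERDICT (by name: the statement is the Claim_ definition above) =====
theorem matches_py_spec : Claim_equal_matches_py := by
  intro ip network mask _hdom hpre
  unfold Spec_matches_py
  unfold Pre_matches_py at hpre
  by_cases hok : (pvOk4 ip && pvOk4 network && pvOk4 mask) = true
  · rw [hok] at hpre
    simp only [Bool.not_true, Bool.false_or, Bool.and_eq_true] at hpre
    obtain ⟨⟨hri, hrn⟩, hrm⟩ := hpre
    obtain ⟨a0, a1, a2, a3, ta, hip, ha0, ha1, ha2, ha3⟩ := range4_shape ip hri
    obtain ⟨n0, n1, n2, n3, tn, hnet, hn0, hn1, hn2, hn3⟩ := range4_shape network hrn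
    obtain ⟨m0, m1, m2, m3, tm, hmask, hm0, hm1, hm2, hm3⟩ := range4_shape mask hrm
    rw [show matches_py ip network mask =
        decide (PySem.Int.band (packI a0 a1 a2 a3) (packI m0 m1 m2 m3) =
          PySem.Int.band (packI n0 n1 n2 n3) (packI m0 m1 m2 m3)) by
      simp [matches_py, pvToInt_long ip a0 a1 a2 a3 ta hip,
        pvToInt_long network n0 n1 n2 n3 tn hnet, pvToInt_long mask m0 m1 m2 m3 tm hmask]]
    rw [show matches_py_alt ip network mask =
        pvLoop (a0::a1::a2::a3::ta) (n0::n1::n2::n3::tn) (m0::m1::m2::m3::tm)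
          (PySem.List.pyRange 0 4 1) by
      simp [matches_py_alt, hip, hnet, hmask]]
    rw [pvLoop_four]
    rw [decide_eq_decide.2 (bandPack_iff a0 a1 a2 a3 n0 n1 n2 n3 m0 m1 m2 m3
      ha0 ha1 ha2 ha3 hn0 hn1 hn2 hn3 hm0 hm1 hm2 hm3)]
    · simp [Bool.and_assoc]
    · infer_instance
  · have hok' : pvOk4 ip = false ∨ pvOk4 network = false ∨ pvOk4 mask = false := by
      cases h1 : pvOk4 ip <;> cases h2 : pvOk4 network <;> cases h3 : pvOk4 mask <;>
        simp_all
    rw [alt_false ip network mask hok']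
    apply matches_py_false
    rcases hok' with h | h | h
    · exact Or.inl (pvToInt_of_ok4_false ip h)
    · exact Or.inr (Or.inl (pvToInt_of_ok4_false network h))
    · exact Or.inr (Or.inr (pvToInt_of_ok4_false mask h))
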